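-- pv_equiv track=rewrite | github.com/ScottLangridge/AdventOfCode | 2015/Day-15/day15-2.py | get_recipes
-- ===== SOURCE A (Python) =====
-- def get_recipes(ingredients, ingredient_spaces):
--     if ingredient_spaces == 0:
--         return [dict()]
--     elif len(ingredients) == 1:
--         return [{ingredients[0]: ingredient_spaces}]
--
--     current_ingredient = ingredients[0]
--     recipes = []
--     for i in range(ingredient_spaces + 1):
--         new_recipe_base = {current_ingredient: i}
--         recipe_completion_options = get_recipes(ingredients[1:], ingredient_spaces - i)
--         recipes.extend([new_recipe_base | completion for completion in recipe_completion_options])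
--     return recipes
-- ===== SOURCE B (Python) =====
-- def get_recipes(ingredients, ingredient_spaces):
--     # Iterative backtracking with an explicit stack of partial recipes:
--     # each state is (recipe so far, next ingredient index, spaces still to allocate);
--     # a recipe is complete as soon as every space is allocated, and the last
--     # ingredient always takes whatever remains.
--     n = len(ingredients)
--     recipes = []
--     stack = [(dict(), 0, ingredient_spaces)]
--     while stack:
--         partial, idx, remaining = stack.pop()
--         if remaining == 0:
--             recipes.append(partial)
--         elif idx == n - 1:
--             recipes.append(partial | {ingredients[idx]: remaining})
--         else:
--             for i in range(remaining, -1, -1):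
--                 stack.append((partial | {ingredients[idx]: i}, idx + 1, remaining - i))
--     return recipes
-- ===== Notes on version B (the rewrite author's own statement) =====
-- stated objective: alternative
-- what changed: A enumerates recipes by depth-first recursion on the ingredient list, merging dicts on the way back up; B is iterative: it runs an explicit while-stack backtracking loop over (partial recipe, next index, remaining spaces) states, completing a recipe as soon as the remaining spaces hit zero or the last ingredient takes the remainder.
import Mathlib
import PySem

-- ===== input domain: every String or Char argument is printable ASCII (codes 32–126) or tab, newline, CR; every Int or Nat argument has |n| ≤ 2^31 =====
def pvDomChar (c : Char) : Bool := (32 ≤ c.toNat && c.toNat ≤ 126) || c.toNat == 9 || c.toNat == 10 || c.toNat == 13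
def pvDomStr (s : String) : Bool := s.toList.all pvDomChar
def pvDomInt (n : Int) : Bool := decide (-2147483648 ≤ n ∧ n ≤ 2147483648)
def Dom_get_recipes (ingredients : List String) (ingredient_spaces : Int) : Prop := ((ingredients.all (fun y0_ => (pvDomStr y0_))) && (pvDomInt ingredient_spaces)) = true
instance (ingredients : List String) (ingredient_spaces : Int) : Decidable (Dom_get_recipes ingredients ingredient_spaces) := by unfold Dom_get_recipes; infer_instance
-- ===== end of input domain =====

-- B replaces A's depth-first recursion over the ingredient list by an explicit-stack
-- iterative backtracking enumeration (objective: alternative, same cost).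

-- ===== PORT A =====
def get_recipes (ingredients : List String) (ingredient_spaces : Int) : List (List (String × Int)) :=
  if ingredient_spaces = 0 then [[]]
  else if ingredients.length = 1 then [[(ingredients.getD 0 "", ingredient_spaces)]]
  else
    match ingredients with
    | [] => []  -- Python raises IndexError here (ingredients[0]); excluded by Pre_
    | x :: rest =>
      (PySem.List.pyRange 0 (ingredient_spaces + 1) 1).foldl
        (fun recipes i =>
          recipes ++ (get_recipes rest (ingredient_spaces - i)).map
            (fun completion => ((PySem.Dict.mk [(x, i)]).update completion).items))
        []

-- ===== PORT B =====
-- fuel bound for the stack loop (a totality guard only: it equals the exact number of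
-- loop iterations, proved below, so it never changes the computed value)
def pvSz : Nat → Int → Nat
  | 0, _ => 1
  | (k+1), r =>
    if r = 0 then 1
    else 1 + ((PySem.List.pyRange 0 (r + 1) 1).map (fun i => pvSz k (r - i))).sum

-- the while-stack loop of B: states are (partial recipe, next index, remaining spaces)
def bLoop (xs : List String) :
    Nat → List (PySem.Dict String Int × Nat × Int) → List (List (String × Int)) →
      List (List (String × Int))
  | 0, _, recipes => recipes
  | _ + 1, [], recipes => recipes
  | fuel + 1, (part, idx, rem) :: rest, recipes =>
    if rem = 0 then bLoop xs fuel rest (recipes ++ [part.items])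
    else if (idx : Int) = (xs.length : Int) - 1 then
      bLoop xs fuel rest (recipes ++ [(part.insert (xs.getD idx "") rem).items])
    else
      match xs[idx]? with
      | none => recipes  -- Python raises IndexError here (empty ingredients); excluded by Pre_
      | some x =>
        bLoop xs fuel
          ((PySem.List.pyRange rem (-1) (-1)).foldl
            (fun st i => (part.insert x i, idx + 1, rem - i) :: st) rest)
          recipes

def get_recipes_alt (ingredients : List String) (ingredient_spaces : Int) : List (List (String × Int)) :=
  bLoop ingredients (pvSz (ingredients.length - 1) ingredient_spaces)
    [(PySem.Dict.empty, 0, ingredient_spaces)] []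

-- ===== PRECONDITION & SPEC =====
-- Pre_ excludes only the inputs on which A raises: an empty ingredient list with nonzero
-- spaces (Python IndexError on ingredients[0]).
def Pre_get_recipes (ingredients : List String) (ingredient_spaces : Int) : Prop :=
  ingredients ≠ [] ∨ ingredient_spaces = 0
instance (ingredients : List String) (ingredient_spaces : Int) : Decidable (Pre_get_recipes ingredients ingredient_spaces) := by unfold Pre_get_recipes; infer_instance
def pvWitness_get_recipes : List String × Int := (["a", "b"], 2)

def Spec_get_recipes (ingredients : List String) (ingredient_spaces : Int) (out : List (List (String × Int))) : Prop := out = get_recipes_alt ingredients ingredient_spaces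
instance (ingredients : List String) (ingredient_spaces : Int) (out : List (List (String × Int))) : Decidable (Spec_get_recipes ingredients ingredient_spaces out) := by unfold Spec_get_recipes; infer_instance

-- ===== CLAIM (what is proved, stated in full; the proofs are below) =====
def Claim_equal_get_recipes : Prop := ∀ (ingredients : List String) (ingredient_spaces : Int), Dom_get_recipes ingredients ingredient_spaces → Pre_get_recipes ingredients ingredient_spaces → Spec_get_recipes ingredients ingredient_spaces (get_recipes ingredients ingredient_spaces)

-- ===== LEMMAS AND PROOFS =====

-- ---- generic dict facts used to relate A's merge to B's incremental inserts ----

theorem pvKeys_eq (d : PySem.Dict String Int) : d.keys = d.items.map (·.1) := rfl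

-- map-replacement is identity when the key is absent
theorem pvRepl_id {l : List (String × Int)} {k : String} (h : ∀ p ∈ l, p.1 ≠ k) (v : Int) :
    l.map (fun p => if p.1 == k then (k, v) else p) = l := by
  conv_rhs => rw [← List.map_id l]
  apply List.map_congr_left
  intro p hp
  simp [h p hp]

-- insert at a contained key commutes with insert at a different key
theorem pvInsert_comm (d : PySem.Dict String Int) {k : String} (q1 : String) (q2 : Int)
    (v : Int) (hk : d.contains k = true) (hne : q1 ≠ k) :
    (d.insert q1 q2).insert k v = (d.insert k v).insert q1 q2 := by
  have hk1 : (d.insert q1 q2).contains k = true := by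
    rw [PySem.Dict.contains_insert]; simp [hk]
  by_cases hq : d.contains q1 = true
  · have hq2 : (d.insert k v).contains q1 = true := by
      rw [PySem.Dict.contains_insert]; simp [hq]
    apply PySem.Dict.ext
    rw [PySem.Dict.items_insert_of_contains _ _ hk1,
        PySem.Dict.items_insert_of_contains _ _ hq,
        PySem.Dict.items_insert_of_contains _ _ hq2,
        PySem.Dict.items_insert_of_contains _ _ hk]
    rw [List.map_map, List.map_map]
    apply List.map_congr_left
    intro p _
    by_cases h1 : p.1 = k <;> by_cases h2 : p.1 = q1  <;>
      simp [Function.comp, h1, h2, hne, Ne.symm hne]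
  · have hq' : d.contains q1 = false := by simpa using hq
    have hq2 : (d.insert k v).contains q1 = false := by
      rw [PySem.Dict.contains_insert]; simp [hq', hne]
    apply PySem.Dict.ext
    rw [PySem.Dict.items_insert_of_contains _ _ hk1,
        PySem.Dict.items_insert_of_not_contains _ _ hq',
        PySem.Dict.items_insert_of_not_contains _ _ hq2,
        PySem.Dict.items_insert_of_contains _ _ hk]
    rw [List.map_append]
    simp [hne]

-- pushing a final overwrite of a contained key through updates that avoid the key
theorem pvUpdate_insert_swap {k : String} (v : Int) :
    ∀ (t : List (String × Int)) (d : PySem.Dict String Int), d.contains k = true →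
      (∀ p ∈ t, p.1 ≠ k) → (d.update t).insert k v = (d.insert k v).update t := by
  intro t
  induction t with
  | nil => intro d _ _; rfl
  | cons q t ih =>
    intro d hk hav
    show ((d.insert q.1 q.2).update t).insert k v = ((d.insert k v).insert q.1 q.2).update t
    rw [ih (d.insert q.1 q.2) (by rw [PySem.Dict.contains_insert]; simp [hk])
        (fun p hp => hav p (List.mem_cons_of_mem _ hp))]
    rw [pvInsert_comm d q.1 q.2 v hk (hav q (List.mem_cons_self))]

theorem pvUpdate_append (d : PySem.Dict String Int) (a b : List (String × Int)) :
    d.update (a ++ b) = (d.update a).update b := by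
  simp [PySem.Dict.update, List.foldl_append]

theorem pvUpdate_cons (d : PySem.Dict String Int) (p : String × Int) (l : List (String × Int)) :
    d.update (p :: l) = (d.insert p.1 p.2).update l := rfl

-- updating with (e.insert k v).items = updating with e.items then inserting (k, v)
theorem pvUpdate_items_insert (e d : PySem.Dict String Int) (k : String) (v : Int)
    (hnd : e.keys.Nodup) :
    d.update ((e.insert k v).items) = (d.update e.items).insert k v := by
  obtain ⟨el⟩ := e
  by_cases hc : (PySem.Dict.mk el).contains k = true
  · rw [PySem.Dict.items_insert_of_contains _ _ hc]
    have hmem : k ∈ (PySem.Dict.mk el).keys := (PySem.Dict.contains_iff_mem_keys _ _).mp hc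
    rw [pvKeys_eq] at hmem hnd
    obtain ⟨p, hp, hpk⟩ := List.mem_map.mp hmem
    obtain ⟨l1, l2, rfl⟩ := List.append_of_mem hp
    rw [List.map_append] at hnd
    have h1 : ∀ q ∈ l1, q.1 ≠ k := by
      intro q hq hqk
      have := List.disjoint_of_nodup_append hnd (a := k)
      simp only [List.mem_map, List.map_cons, List.mem_cons] at this
      exact absurd (Or.inl hpk.symm) (this ⟨q, hq, hqk⟩)
    have h2 : ∀ q ∈ l2, q.1 ≠ k := by
      intro q hq hqk
      have hn2 := (List.nodup_append.mp hnd).2.1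
      rw [List.map_cons, hpk] at hn2
      exact absurd (List.mem_map.mpr ⟨q, hq, hqk⟩) (List.nodup_cons.mp hn2).1
    rw [List.map_append, pvRepl_id h1, List.map_cons, if_pos (by simp [hpk]), pvRepl_id h2]
    rw [pvUpdate_append, pvUpdate_cons, pvUpdate_append, pvUpdate_cons]
    show ((d.update l1).insert k v).update l2 = (((d.update l1).insert p.1 p.2).update l2).insert k v
    rw [pvUpdate_insert_swap v l2 ((d.update l1).insert p.1 p.2)
        (by rw [PySem.Dict.contains_insert]; simp [hpk]) h2]
    rw [show p.1 = k from hpk, PySem.Dict.insert_insert_self]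
  · have hc' : (PySem.Dict.mk el).contains k = false := by
      simp only [Bool.not_eq_true] at hc; exact hc
    rw [PySem.Dict.items_insert_of_not_contains _ _ hc', pvUpdate_append]
    rfl

-- updating with an already-deduplicated pair list is updating with the raw list
theorem pvDict_update_update (ps : List (String × Int)) :
    ∀ (e d : PySem.Dict String Int), e.keys.Nodup →
      d.update ((e.update ps).items) = (d.update e.items).update ps := by
  induction ps with
  | nil => intro e d _; rfl
  | cons p ps ih =>
    intro e d hnd
    show d.update (((e.insert p.1 p.2).update ps).items) = ((d.update e.items).insert p.1 p.2).update ps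
    rw [ih (e.insert p.1 p.2) d (PySem.Dict.nodup_keys_insert _ _ _ hnd)]
    rw [pvUpdate_items_insert e (d := d) p.1 p.2 hnd]

theorem pvUpdate_nil (d : PySem.Dict String Int) : d.update [] = d := rfl

-- replaying the items of a dict with unique keys into the empty dict rebuilds it
theorem pvEmptyUpdate_eq_mk :
    ∀ (c : List (String × Int)), (c.map Prod.fst).Nodup →
      PySem.Dict.empty.update c = PySem.Dict.mk c := by
  intro c
  induction c using List.reverseRecOn with
  | nil => intro _; rfl
  | append_singleton l p ih =>
    intro hnd
    rw [List.map_append] at hnd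
    have hl : (l.map Prod.fst).Nodup := (List.nodup_append.mp hnd).1
    have hnotin : p.1 ∉ l.map Prod.fst := by
      intro hmem
      have := List.disjoint_of_nodup_append hnd (a := p.1) hmem
      simp at this
    rw [pvUpdate_append, ih hl, pvUpdate_cons, pvUpdate_nil]
    have hcon : (PySem.Dict.mk l).contains p.1 = false := by
      rw [← Bool.not_eq_true, PySem.Dict.contains_iff_mem_keys, pvKeys_eq]
      simpa using hnotin
    apply PySem.Dict.ext
    rw [PySem.Dict.items_insert_of_not_contains _ _ hcon]


-- unfolding of A on a cons in the recursive branch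
theorem getRecipes_cons (x : String) (rest : List String) (s : Int) (h0 : ¬ s = 0)
    (h1 : ¬ (x :: rest).length = 1) :
    get_recipes (x :: rest) s
      = (PySem.List.pyRange 0 (s + 1) 1).foldl
          (fun recipes i =>
            recipes ++ (get_recipes rest (s - i)).map
              (fun completion => ((PySem.Dict.mk [(x, i)]).update completion).items))
          [] := by
  rw [get_recipes.eq_def, if_neg h0, if_neg h1]

-- every recipe A returns has pairwise-distinct keys (it is the items list of a dict)
theorem pvA_out_nodup (xs : List String) (s : Int) :
    ∀ c ∈ get_recipes xs s, (c.map Prod.fst).Nodup := by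
  intro c hc
  by_cases h0 : s = 0
  · rw [h0, get_recipes.eq_def] at hc
    simp at hc; simp [hc]
  · by_cases h1 : xs.length = 1
    · rw [get_recipes.eq_def, if_neg h0, if_pos h1] at hc
      simp at hc; simp [hc]
    · match xs with
      | [] =>
        rw [get_recipes.eq_def, if_neg h0, if_neg h1] at hc
        simp at hc
      | x :: rest =>
        rw [getRecipes_cons x rest s h0 h1,
            PySem.List.foldl_append_eq_flatMap, List.nil_append] at hc
        simp only [List.mem_flatMap, List.mem_map] at hc
        obtain ⟨i, _, completion, _, rfl⟩ := hc
        rw [← pvKeys_eq]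
        exact PySem.Dict.nodup_keys_update _ _ (by simp [PySem.Dict.keys])

-- ---- the recursive reading of B's stack loop ----

-- the recipes one stack state eventually contributes, defined by recursion on the
-- remaining ingredients (a proof device; B itself is the iterative bLoop)
def pvRec (xs : List String) (d : PySem.Dict String Int) (idx : Nat) (rem : Int) :
    List (List (String × Int)) :=
  if rem = 0 then [d.items]
  else if idx + 1 = xs.length then [(d.insert (xs.getD idx "") rem).items]
  else if _h : idx + 1 < xs.length then
    (PySem.List.pyRange 0 (rem + 1) 1).flatMap
      (fun i => pvRec xs (d.insert (xs.getD idx "") i) (idx + 1) (rem - i))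
  else []
termination_by xs.length - idx
decreasing_by omega

-- pvRec at (d, idx, rem) is A's recursion on the ingredient suffix, merged into d
theorem pvRec_eq_A : ∀ (k : Nat) (xs : List String) (d : PySem.Dict String Int)
    (idx : Nat) (rem : Int), idx + k = xs.length → 1 ≤ k →
      pvRec xs d idx rem
        = (get_recipes (xs.drop idx) rem).map (fun c => (d.update c).items) := by
  intro k
  induction k with
  | zero => intro _ _ _ _ h h1; omega
  | succ k ih =>
    intro xs d idx rem hlen _
    have hidx : idx < xs.length := by omega
    rw [pvRec]
    by_cases h0 : rem = 0
    · rw [if_pos h0, h0, get_recipes.eq_def]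
      simp [pvUpdate_nil]
    · rw [if_neg h0]
      by_cases hlast : idx + 1 = xs.length
      · rw [if_pos hlast]
        have hdrop : xs.drop idx = [xs.getD idx ""] := by
          rw [List.drop_eq_getElem_cons hidx, List.drop_eq_nil_of_le (by omega)]
          simp [List.getD_eq_getElem?_getD, hidx]
        rw [hdrop, get_recipes.eq_def, if_neg h0, if_pos (by simp)]
        simp [pvUpdate_cons, pvUpdate_nil]
      · rw [if_neg hlast, dif_pos (by omega)]
        have hk1 : 1 ≤ k := by omega
        have hdrop : xs.drop idx = xs.getD idx "" :: xs.drop (idx + 1) := by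
          rw [List.drop_eq_getElem_cons hidx]
          simp [List.getD_eq_getElem?_getD, hidx]
        rw [hdrop, getRecipes_cons _ _ _ h0 (by
          have : (xs.drop (idx + 1)).length = k := by simp; omega
          simp [this]; omega)]
        rw [PySem.List.foldl_append_eq_flatMap, List.nil_append, List.map_flatMap]
        apply List.flatMap_congr
        intro i _
        rw [ih xs (d.insert (xs.getD idx "") i) (idx + 1) (rem - i) (by omega) hk1]
        rw [List.map_map]
        apply List.map_congr_left
        intro completion _
        simp only [Function.comp_apply]
        have := pvDict_update_update completion (PySem.Dict.mk [(xs.getD idx "", i)]) d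
          (by simp [PySem.Dict.keys])
        rw [this]
        rfl

-- total iteration count of a stack
def pvMeas (n : Nat) (stack : List (PySem.Dict String Int × Nat × Int)) : Nat :=
  (stack.map (fun st => pvSz (n - 1 - st.2.1) st.2.2)).sum

theorem pvMeas_cons (n : Nat) (d : PySem.Dict String Int) (idx : Nat) (rem : Int) (rest) :
    pvMeas n ((d, idx, rem) :: rest) = pvSz (n - 1 - idx) rem + pvMeas n rest := by
  simp [pvMeas]

-- a loop 'for i in R: stack.append(f(i))' is stacking R's reverse on top
theorem pvFoldl_cons {α β : Type} (f : α → β) :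
    ∀ (l : List α) (rest : List β),
      l.foldl (fun st i => f i :: st) rest = (l.map f).reverse ++ rest := by
  intro l
  induction l with
  | nil => intro rest; rfl
  | cons a l ih => intro rest; simp [ih, List.foldl_cons]

theorem bLoop_nil (xs : List String) (fuel : Nat) (recipes : List (List (String × Int))) :
    bLoop xs fuel [] recipes = recipes := by
  cases fuel <;> rfl

-- the loop processes the top chunk of the stack completely, consuming exactly its
-- iteration count of fuel and appending exactly its pvRec contributions
theorem bLoop_chunk (xs : List String) : ∀ (K : Nat)
    (states : List (PySem.Dict String Int × Nat × Int)),
    (∀ st ∈ states, st.2.1 < xs.length ∧ xs.length - st.2.1 ≤ K) →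
    ∀ (stack : List (PySem.Dict String Int × Nat × Int))
      (recipes : List (List (String × Int))) (fuel : Nat),
      pvMeas xs.length states ≤ fuel →
      bLoop xs fuel (states ++ stack) recipes
        = bLoop xs (fuel - pvMeas xs.length states) stack
            (recipes ++ states.flatMap (fun st => pvRec xs st.1 st.2.1 st.2.2)) := by
  intro K
  induction K using Nat.strong_induction_on with
  | _ K IHK =>
    intro states
    induction states with
    | nil => intro _ stack recipes fuel _; simp [pvMeas]
    | cons st tail ihT =>
      intro hcond stack recipes fuel hfuel
      obtain ⟨d, idx, rem⟩ := st
      have hst := hcond _ (List.mem_cons_self)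
      have hidx : idx < xs.length := hst.1
      have hKb : xs.length - idx ≤ K := hst.2
      have htail : ∀ st ∈ tail, st.2.1 < xs.length ∧ xs.length - st.2.1 ≤ K :=
        fun st hst => hcond st (List.mem_cons_of_mem _ hst)
      rw [pvMeas_cons] at hfuel ⊢
      have hsz1 : 1 ≤ pvSz (xs.length - 1 - idx) rem := by
        cases h : xs.length - 1 - idx with
        | zero => simp [pvSz]
        | succ m => rw [pvSz]; split <;> omega
      obtain ⟨f, rfl⟩ : ∃ f, fuel = f + 1 := ⟨fuel - 1, by omega⟩
      rw [List.cons_append, bLoop]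
      by_cases h0 : rem = 0
      · rw [if_pos h0]
        have hsz : pvSz (xs.length - 1 - idx) rem = 1 := by
          cases h : xs.length - 1 - idx with
          | zero => simp [pvSz]
          | succ m => rw [pvSz, if_pos h0]
        rw [ihT htail stack (recipes ++ [d.items]) f (by omega)]
        have hrec : pvRec xs d idx rem = [d.items] := by rw [pvRec, if_pos h0]
        rw [List.flatMap_cons, hrec]
        have : f - pvMeas xs.length tail = f + 1 - (pvSz (xs.length - 1 - idx) rem + pvMeas xs.length tail) := by omega
        rw [← this]
        simp
      · rw [if_neg h0]
        by_cases hlast : (idx : Int) = (xs.length : Int) - 1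
        · rw [if_pos hlast]
          have hsz : pvSz (xs.length - 1 - idx) rem = 1 := by
            have : xs.length - 1 - idx = 0 := by omega
            simp [this, pvSz]
          rw [ihT htail stack _ f (by omega)]
          have hrec : pvRec xs d idx rem = [(d.insert (xs.getD idx "") rem).items] := by
            rw [pvRec, if_neg h0, if_pos (by omega)]
          rw [List.flatMap_cons, hrec]
          have : f - pvMeas xs.length tail = f + 1 - (pvSz (xs.length - 1 - idx) rem + pvMeas xs.length tail) := by omega
          rw [← this]
          simp
        · rw [if_neg hlast]
          have hidx2 : idx + 2 ≤ xs.length := by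
            rcases Nat.lt_or_ge (idx + 1) xs.length with h | h
            · omega
            · exfalso; apply hlast; omega
          have hget : xs[idx]? = some (xs.getD idx "") := by
            simp [List.getD_eq_getElem?_getD, hidx]
          rw [hget]
          show bLoop xs f
              ((PySem.List.pyRange rem (-1) (-1)).foldl
                (fun st i => (d.insert (xs.getD idx "") i, idx + 1, rem - i) :: st)
                (tail ++ stack)) recipes = _
          -- the pushed stack is the increasing-i children on top of the rest
          rw [pvFoldl_cons]
          rw [PySem.List.pyRange_neg_one_eq_reverse]
          have : ((-1 : Int) + 1) = 0 := by ring
          rw [this, List.map_reverse, List.reverse_reverse]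
          set children := (PySem.List.pyRange 0 (rem + 1) 1).map
            (fun i => (d.insert (xs.getD idx "") i, idx + 1, rem - i)) with hch
          have hchcond : ∀ st ∈ children, st.2.1 < xs.length ∧ xs.length - st.2.1 ≤ K - 1 := by
            intro st hst
            rw [hch] at hst
            obtain ⟨i, _, rfl⟩ := List.mem_map.mp hst
            constructor <;> simp <;> omega
          -- the state's iteration count is one plus its children's
          have hsz : pvSz (xs.length - 1 - idx) rem = 1 + pvMeas xs.length children := by
            obtain ⟨m, hm⟩ : ∃ m, xs.length - 1 - idx = m + 1 := ⟨xs.length - 2 - idx, by omega⟩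
            rw [hm, pvSz, if_neg h0, pvMeas, hch, List.map_map]
            congr 2
            apply List.map_congr_left
            intro i _
            have : xs.length - 1 - (idx + 1) = m := by omega
            simp [Function.comp, this]
          rw [IHK (K - 1) (by omega) children hchcond (tail ++ stack) recipes f (by omega)]
          rw [ihT htail stack _ (f - pvMeas xs.length children) (by omega)]
          have hrec : pvRec xs d idx rem
              = children.flatMap (fun st => pvRec xs st.1 st.2.1 st.2.2) := by
            rw [pvRec, if_neg h0, if_neg (by omega), dif_pos (by omega), hch,
                List.flatMap_map]
          rw [List.flatMap_cons, ← hrec]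
          have : f - pvMeas xs.length children - pvMeas xs.length tail
              = f + 1 - (pvSz (xs.length - 1 - idx) rem + pvMeas xs.length tail) := by omega
          rw [this, List.append_assoc]

-- ===== VERDICT (by name: the statement is the Claim_ definition above) =====
theorem get_recipes_spec : Claim_equal_get_recipes := by
  intro xs s _ hpre
  unfold Spec_get_recipes
  match xs, hpre with
  | [], hpre =>
    have hs : s = 0 := by
      rcases hpre with h | h
      · exact absurd rfl h
      · exact h
    subst hs
    rw [get_recipes]
    rfl
  | x :: t, _ =>
    set xs := x :: t with hxs
    have hne : xs.length ≠ 0 := by simp [hxs]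
    unfold get_recipes_alt
    have := bLoop_chunk xs xs.length [(PySem.Dict.empty, 0, s)]
      (by intro st hst; simp at hst; subst hst; simp; omega) [] []
      (pvSz (xs.length - 1) s)
      (by simp [pvMeas])
    rw [show [(PySem.Dict.empty, 0, s)] ++ ([] : List (PySem.Dict String Int × Nat × Int))
          = [(PySem.Dict.empty, 0, s)] from rfl] at this
    rw [this, bLoop_nil, List.flatMap_cons, List.flatMap_nil, List.nil_append, List.append_nil]
    rw [pvRec_eq_A xs.length xs PySem.Dict.empty 0 s (by omega) (by omega)]
    rw [List.drop_zero]
    conv_lhs => rw [← List.map_id (get_recipes xs s)]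
    apply List.map_congr_left
    intro c hc
    rw [pvEmptyUpdate_eq_mk c (pvA_out_nodup xs s c hc)]
    rfl
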